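-- pv_equiv track=rewrite | github.com/gfreundt/general | heroes.py | is_possible
-- ===== SOURCE A (Python) =====
-- def is_possible(database: dict) -> bool:
--     database = {i: j for i, j in database.items() if len(j) > 0}
--     day1, day2 = [], []
--     while len(day1) + len(day2) < len(database):
--         for hero in database:
--             if not (hero in day1 or hero in day2):
--                 must_be_in_day1 = [i for i in database[hero] if i in day2]
--                 must_be_in_day2 = [i for i in database[hero] if i in day1]
--                 if must_be_in_day1 and must_be_in_day2:
--                     return False
--                 elif must_be_in_day1:
--                     day1.append(hero)
--                 elif must_be_in_day2:
--                     day2.append(hero)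
--                 else:
--                     day1.append(hero)
--     return True
-- ===== SOURCE B (Python) =====
-- def is_possible(database: dict) -> bool:
--     db = {h: cs for h, cs in database.items() if cs}
--     # reverse adjacency: triggers[c] = heroes h with c among h's conflicts
--     triggers = {}
--     for h, cs in db.items():
--         for c in cs:
--             triggers.setdefault(c, []).append(h)
--     color = {}
--     pending = {h: set() for h in db}
--     for cur in db:
--         p = pending[cur]
--         if 1 in p and 2 in p:
--             return False
--         day = 1 if 2 in p or not p else 2
--         color[cur] = day
--         for h in triggers.get(cur, []):
--             if h not in color:
--                 pending[h].add(day)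
--     return True
-- ===== Notes on version B (the rewrite author's own statement) =====
-- stated objective: faster
-- what changed: Replaces the placement pass that rescans the day1/day2 lists for every conflict with a push-based single pass over a precomputed reverse-adjacency index, maintaining per-hero pending day sets so no list scan remains.
import Mathlib
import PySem

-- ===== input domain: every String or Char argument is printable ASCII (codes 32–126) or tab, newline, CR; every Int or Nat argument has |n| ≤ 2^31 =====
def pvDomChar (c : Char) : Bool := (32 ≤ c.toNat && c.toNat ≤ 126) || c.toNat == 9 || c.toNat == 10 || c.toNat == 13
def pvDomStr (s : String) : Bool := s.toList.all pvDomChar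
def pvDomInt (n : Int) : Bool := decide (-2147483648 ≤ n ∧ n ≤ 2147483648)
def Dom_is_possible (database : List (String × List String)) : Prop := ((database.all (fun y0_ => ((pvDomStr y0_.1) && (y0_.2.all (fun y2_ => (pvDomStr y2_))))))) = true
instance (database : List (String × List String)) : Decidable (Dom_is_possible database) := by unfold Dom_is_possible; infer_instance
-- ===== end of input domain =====

-- B replaces A's rescans of the day lists with one push-based pass over a reverse-adjacency index (objective: faster).

-- ===== PORT A =====
-- database = {i: j for i, j in database.items() if len(j) > 0}  (the parameter arrives as a Python dict)
def pvItemsA (database : List (String × List String)) : List (String × List String) :=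
  ((PySem.Dict.ofList database).items).filter (fun p => 0 < p.2.length)

-- one 'for hero in database' pass; 'database[hero]' is the paired value since dict keys are unique.
-- none = the 'return False' exit; some (day1, day2) = the state after the pass.
def pvPassA : List (String × List String) → List String → List String → Option (List String × List String)
  | [], d1, d2 => some (d1, d2)
  | (hero, cs) :: rest, d1, d2 =>
    if d1.contains hero || d2.contains hero then pvPassA rest d1 d2
    else
      let m1 := cs.filter (fun c => d2.contains c)
      let m2 := cs.filter (fun c => d1.contains c)
      if !m1.isEmpty && !m2.isEmpty then none
      else if !m1.isEmpty then pvPassA rest (d1 ++ [hero]) d2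
      else if !m2.isEmpty then pvPassA rest d1 (d2 ++ [hero])
      else pvPassA rest (d1 ++ [hero]) d2

-- the 'while len(day1) + len(day2) < len(database)' loop; fuel only makes it total (unreachable at 0).
def pvWhileA : Nat → List (String × List String) → List String → List String → Bool
  | 0, _, _, _ => true
  | fuel + 1, items, d1, d2 =>
    if d1.length + d2.length < items.length then
      match pvPassA items d1 d2 with
      | none => false
      | some (d1', d2') => pvWhileA fuel items d1' d2'
    else true

def is_possible (database : List (String × List String)) : Bool :=
  let items := pvItemsA database
  pvWhileA (items.length + 1) items [] []

-- ===== PORT B =====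
def pvItemsB (database : List (String × List String)) : List (String × List String) :=
  ((PySem.Dict.ofList database).items).filter (fun p => 0 < p.2.length)

-- triggers.setdefault(c, []).append(h)  ==  triggers[c] = triggers.get(c, []) + [h]
def pvTriggers (items : List (String × List String)) : PySem.Dict String (List String) :=
  items.foldl (fun t p => p.2.foldl (fun t c => t.modify c [] (fun l => l ++ [p.1])) t) PySem.Dict.empty

-- pending = {h: set() for h in db}
def pvPendingInit (items : List (String × List String)) : PySem.Dict String (PySem.Set Int) :=
  items.foldl (fun pd p => pd.insert p.1 PySem.Set.empty) PySem.Dict.empty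

-- the 'for cur in db' pass; pending[cur] is always present (initialised for every key of db).
def pvLoopB (trig : PySem.Dict String (List String)) :
    List (String × List String) → PySem.Dict String Int → PySem.Dict String (PySem.Set Int) → Bool
  | [], _, _ => true
  | (cur, _) :: rest, color, pending =>
    let p := pending.getD cur PySem.Set.empty
    if p.contains 1 && p.contains 2 then false
    else
      let day : Int := if p.contains 2 || p.isEmpty then 1 else 2
      let color' := color.insert cur day
      let pending' := (trig.getD cur []).foldl
        (fun pd h => if color'.contains h then pd else pd.modify h PySem.Set.empty (fun s => PySem.Set.add s day)) pending
      pvLoopB trig rest color' pending'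

def is_possible_alt (database : List (String × List String)) : Bool :=
  let items := pvItemsB database
  pvLoopB (pvTriggers items) items PySem.Dict.empty (pvPendingInit items)

-- ===== PRECONDITION & SPEC =====
def Spec_is_possible (database : List (String × List String)) (out : Bool) : Prop := out = is_possible_alt database
instance (database : List (String × List String)) (out : Bool) : Decidable (Spec_is_possible database out) := by unfold Spec_is_possible; infer_instance

-- ===== CLAIM (what is proved, stated in full; the proofs are below) =====
def Claim_equal_is_possible : Prop := ∀ (database : List (String × List String)), Dom_is_possible database → Spec_is_possible database (is_possible database)


-- ===== LEMMAS AND PROOFS =====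

-- the (conflict, hero) pairs the nested triggers loop walks, flattened
def pvPairs (items : List (String × List String)) : List (String × String) :=
  items.flatMap (fun p => p.2.map (fun c => (c, p.1)))

theorem pvTrig_fold_eq (items : List (String × List String)) (d : PySem.Dict String (List String)) :
    items.foldl (fun t p => p.2.foldl (fun t c => t.modify c [] (fun l => l ++ [p.1])) t) d
      = (pvPairs items).foldl (fun t q => t.modify q.1 [] (fun l => l ++ [q.2])) d := by
  induction items generalizing d with
  | nil => rfl
  | cons p rest ih =>
    simp [pvPairs, List.foldl_append, List.foldl_map, ih]

theorem pvMem_trig (items : List (String × List String)) (c h : String) :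
    h ∈ (pvTriggers items).getD c [] ↔ ∃ cs, (h, cs) ∈ items ∧ c ∈ cs := by
  unfold pvTriggers
  rw [pvTrig_fold_eq, PySem.Dict.getD_foldl_modify_append]
  simp only [PySem.Dict.getD_empty, List.nil_append, List.mem_map, List.mem_filter,
    List.mem_flatMap, pvPairs, beq_iff_eq]
  constructor
  · rintro ⟨⟨c', h'⟩, ⟨⟨⟨a, cs⟩, hp, c'', hm, heq⟩, hcc⟩, hh⟩
    simp only at hcc hh hm
    injection heq with e1 e2
    subst e1; subst e2; subst hcc; subst hh
    exact ⟨cs, hp, hm⟩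
  · rintro ⟨cs, hmem, hc⟩
    refine ⟨(c, h), ⟨⟨(h, cs), hmem, c, hc, rfl⟩, rfl⟩, rfl⟩

theorem pvFst_nodup_inj {α β : Type} (l : List (α × β)) (hnd : (l.map Prod.fst).Nodup)
    {a : α} {b b' : β} (h1 : (a, b) ∈ l) (h2 : (a, b') ∈ l) : b = b' := by
  induction l with
  | nil => cases h1
  | cons p t ih =>
    simp only [List.map_cons, List.nodup_cons] at hnd
    rcases List.mem_cons.mp h1 with e1 | m1 <;> rcases List.mem_cons.mp h2 with e2 | m2
    · rw [← e1] at e2; exact (congrArg Prod.snd e2).symm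
    · exact absurd (List.mem_map.mpr ⟨(a, b'), m2, by rw [← e1]⟩) hnd.1
    · exact absurd (List.mem_map.mpr ⟨(a, b), m1, by rw [← e2]⟩) hnd.1
    · exact ih hnd.2 m1 m2

theorem pvPendingInit_getD (items : List (String × List String)) (h : String) :
    (pvPendingInit items).getD h PySem.Set.empty = PySem.Set.empty := by
  have aux : ∀ (L : List (String × List String)) (pd : PySem.Dict String (PySem.Set Int)),
      (∀ h, pd.getD h PySem.Set.empty = PySem.Set.empty) →
      ∀ h, (L.foldl (fun pd p => pd.insert p.1 PySem.Set.empty) pd).getD h PySem.Set.empty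
        = PySem.Set.empty := by
    intro L
    induction L with
    | nil => intro pd hpd h; exact hpd h
    | cons p t ih =>
      intro pd hpd h
      refine ih _ (fun h' => ?_) h
      rw [PySem.Dict.getD_insert]
      split
      · rfl
      · exact hpd h'
  exact aux items PySem.Dict.empty (fun h => by simp [PySem.Dict.getD_empty]) h

theorem pvMem_pending_fold (L : List String) (cc : PySem.Dict String Int) (day : Int)
    (pd : PySem.Dict String (PySem.Set Int)) (h0 : String) (d : Int) :
    d ∈ (L.foldl (fun pd h => if cc.contains h then pd
          else pd.modify h PySem.Set.empty (fun s => PySem.Set.add s day)) pd).getD h0 PySem.Set.empty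
      ↔ d ∈ pd.getD h0 PySem.Set.empty ∨ (h0 ∈ L ∧ cc.contains h0 = false ∧ d = day) := by
  induction L generalizing pd with
  | nil => simp
  | cons h L ih =>
    rw [List.foldl_cons, ih]
    by_cases hc : cc.contains h <;> by_cases he : h0 = h
    · subst he; simp [hc]
    · simp [hc, he]
    · subst he; rw [if_neg hc]
      simp [PySem.Set.mem_add, Bool.not_eq_true] at hc ⊢
      simp [hc]; tauto
    · rw [if_neg hc]
      simp [PySem.Dict.getD_modify, he]


theorem pvContains_false {l : List String} {x : String} (h : x ∉ l) : l.contains x = false := by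
  rw [← Bool.not_eq_true, List.contains_iff_mem]; exact h

theorem pvFilter_isEmpty_false {p : String → Bool} {cs : List String} :
    (cs.filter p).isEmpty = false ↔ ∃ c ∈ cs, p c = true := by
  rw [Bool.eq_false_iff]
  simp [List.isEmpty_iff, List.filter_eq_nil_iff]

theorem pvGet?_none {color : PySem.Dict String Int} {cur : String}
    (h : color.contains cur = false) : color.get? cur = none := by
  rw [PySem.Dict.contains_eq_isSome_get?] at h
  cases hc : color.get? cur with
  | none => rfl
  | some v => rw [hc] at h; simp at h

theorem pvInv_append {d1 : List String} {color : PySem.Dict String Int} {cur : String} {v : Int}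
    (hi : ∀ x, x ∈ d1 ↔ color.get? x = some v) (hcurn : color.get? cur = none) :
    ∀ x, x ∈ d1 ++ [cur] ↔ (color.insert cur v).get? x = some v := by
  intro x
  rw [List.mem_append, PySem.Dict.get?_insert]
  by_cases hx : x = cur
  · subst hx; simp
  · simp [hx, hi x]

theorem pvInv_other {d2 : List String} {color : PySem.Dict String Int} {cur : String} {v w : Int}
    (hi : ∀ x, x ∈ d2 ↔ color.get? x = some w) (hvw : v ≠ w) (hcur : cur ∉ d2) :
    ∀ x, x ∈ d2 ↔ (color.insert cur v).get? x = some w := by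
  intro x
  rw [PySem.Dict.get?_insert]
  by_cases hx : x = cur
  · subst hx; simp [hcur, hvw]
  · simp [hx, hi x]

-- re-establishing the pending-set invariant after one placement
theorem pvInvStep (items : List (String × List String)) (hnd : (items.map Prod.fst).Nodup)
    (cur : String) (cs : List String) (rest : List (String × List String))
    (color : PySem.Dict String Int) (pending : PySem.Dict String (PySem.Set Int)) (day : Int)
    (hi4 : ∀ p ∈ (cur, cs) :: rest, color.contains p.1 = false)
    (hi5 : ∀ p ∈ (cur, cs) :: rest, ∀ d : Int,
      d ∈ pending.getD p.1 PySem.Set.empty ↔ ∃ c ∈ p.2, color.get? c = some d)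
    (hi6 : (((cur, cs) :: rest).map Prod.fst).Nodup)
    (hi7 : ∀ p ∈ (cur, cs) :: rest, p ∈ items) :
    ∀ p ∈ rest, ∀ d : Int,
      d ∈ (((pvTriggers items).getD cur []).foldl
            (fun pd h => if (color.insert cur day).contains h then pd
              else pd.modify h PySem.Set.empty (fun s => PySem.Set.add s day)) pending).getD p.1
            PySem.Set.empty
        ↔ ∃ c ∈ p.2, (color.insert cur day).get? c = some d := by
  intro p hp d
  have hcurn : color.get? cur = none := pvGet?_none (hi4 _ (List.mem_cons_self ..))
  have hne : p.1 ≠ cur := by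
    simp only [List.map_cons, List.nodup_cons] at hi6
    intro e
    exact hi6.1 (e ▸ List.mem_map.mpr ⟨p, hp, rfl⟩)
  have hcp : color.contains p.1 = false := hi4 p (List.mem_cons_of_mem _ hp)
  have hcp' : (color.insert cur day).contains p.1 = false := by
    rw [PySem.Dict.contains_insert, hcp]
    simp [hne]
  rw [pvMem_pending_fold]
  constructor
  · rintro (hin | ⟨htrig, _, rfl⟩)
    · obtain ⟨c, hc, hcol⟩ := (hi5 p (List.mem_cons_of_mem _ hp) d).mp hin
      have hcc : c ≠ cur := fun e => by rw [e, hcurn] at hcol; cases hcol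
      exact ⟨c, hc, by rw [PySem.Dict.get?_insert, if_neg hcc]; exact hcol⟩
    · obtain ⟨cs', hcs', hcur⟩ := (pvMem_trig items cur p.1).mp htrig
      have : cs' = p.2 := pvFst_nodup_inj items hnd hcs'
        (by have := hi7 p (List.mem_cons_of_mem _ hp); rwa [← Prod.mk.eta (p := p)] at this)
      subst this
      exact ⟨cur, hcur, by rw [PySem.Dict.get?_insert, if_pos rfl]⟩
  · rintro ⟨c, hc, hcol⟩
    rw [PySem.Dict.get?_insert] at hcol
    by_cases hcc : c = cur
    · rw [if_pos hcc] at hcol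
      cases hcol
      refine Or.inr ⟨?_, hcp', rfl⟩
      exact (pvMem_trig items cur p.1).mpr ⟨p.2, by rw [Prod.mk.eta]; exact hi7 p (List.mem_cons_of_mem _ hp), hcc ▸ hc⟩
    · rw [if_neg hcc] at hcol
      exact Or.inl ((hi5 p (List.mem_cons_of_mem _ hp) d).mpr ⟨c, hc, hcol⟩)

theorem pvPassA_len : ∀ (rest : List (String × List String)) (d1 d2 : List String),
    (rest.map Prod.fst).Nodup →
    (∀ p ∈ rest, p.1 ∉ d1 ∧ p.1 ∉ d2) →
    ∀ e1 e2, pvPassA rest d1 d2 = some (e1, e2) →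
    e1.length + e2.length = d1.length + d2.length + rest.length := by
  intro rest
  induction rest with
  | nil =>
    intro d1 d2 _ _ e1 e2 h
    simp only [pvPassA, Option.some.injEq, Prod.mk.injEq] at h
    obtain ⟨rfl, rfl⟩ := h
    simp
  | cons p rest ih =>
    intro d1 d2 hnd hcont e1 e2 h
    obtain ⟨cur, cs⟩ := p
    obtain ⟨hc1, hc2⟩ := hcont (cur, cs) (List.mem_cons_self ..)
    simp only [List.map_cons, List.nodup_cons] at hnd
    have hnotin : ∀ q ∈ rest, q.1 ∉ d1 ++ [cur] ∧ q.1 ∉ d2 ++ [cur] := by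
      intro q hq
      have hqc : q.1 ≠ cur := fun e => hnd.1 (e ▸ List.mem_map.mpr ⟨q, hq, rfl⟩)
      have := hcont q (List.mem_cons_of_mem _ hq)
      simp_all
    simp only [pvPassA, pvContains_false hc1, pvContains_false hc2, Bool.or_self,
      Bool.false_eq_true, if_false] at h
    split at h
    · cases h
    · split at h
      · have := ih (d1 ++ [cur]) d2 hnd.2
          (fun q hq => ⟨(hnotin q hq).1, (hcont q (List.mem_cons_of_mem _ hq)).2⟩) e1 e2 h
        simp only [List.length_append, List.length_cons, List.length_nil] at this ⊢
        omega
      · split at h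
        · have := ih d1 (d2 ++ [cur]) hnd.2
            (fun q hq => ⟨(hcont q (List.mem_cons_of_mem _ hq)).1, (hnotin q hq).2⟩) e1 e2 h
          simp only [List.length_append, List.length_cons, List.length_nil] at this ⊢
          omega
        · have := ih (d1 ++ [cur]) d2 hnd.2
            (fun q hq => ⟨(hnotin q hq).1, (hcont q (List.mem_cons_of_mem _ hq)).2⟩) e1 e2 h
          simp only [List.length_append, List.length_cons, List.length_nil] at this ⊢
          omega

theorem pvMain (items : List (String × List String)) (hnd : (items.map Prod.fst).Nodup) :
    ∀ (rest : List (String × List String)) (d1 d2 : List String)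
      (color : PySem.Dict String Int) (pending : PySem.Dict String (PySem.Set Int)),
    (∀ x, x ∈ d1 ↔ color.get? x = some 1) →
    (∀ x, x ∈ d2 ↔ color.get? x = some 2) →
    (∀ x d, color.get? x = some d → d = 1 ∨ d = 2) →
    (∀ p ∈ rest, color.contains p.1 = false) →
    (∀ p ∈ rest, ∀ d : Int, d ∈ pending.getD p.1 PySem.Set.empty ↔ ∃ c ∈ p.2, color.get? c = some d) →
    (rest.map Prod.fst).Nodup →
    (∀ p ∈ rest, p ∈ items) →
    pvLoopB (pvTriggers items) rest color pending = (pvPassA rest d1 d2).isSome := by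
  intro rest
  induction rest with
  | nil => intro d1 d2 color pending _ _ _ _ _ _ _; simp [pvLoopB, pvPassA]
  | cons q rest ih =>
    obtain ⟨cur, cs⟩ := q
    intro d1 d2 color pending hi1 hi2 hi3 hi4 hi5 hi6 hi7
    have hcurc : color.contains cur = false := hi4 _ (List.mem_cons_self ..)
    have hcurn : color.get? cur = none := pvGet?_none hcurc
    have hd1cur : cur ∉ d1 := fun hm => by have := (hi1 cur).mp hm; rw [hcurn] at this; cases this
    have hd2cur : cur ∉ d2 := fun hm => by have := (hi2 cur).mp hm; rw [hcurn] at this; cases this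
    have hp := hi5 (cur, cs) (List.mem_cons_self ..)
    simp only at hp
    have hrest6 : (rest.map Prod.fst).Nodup := by
      simp only [List.map_cons, List.nodup_cons] at hi6; exact hi6.2
    have hrest4 : ∀ p ∈ rest, color.contains p.1 = false :=
      fun p hpm => hi4 p (List.mem_cons_of_mem _ hpm)
    have hrest7 : ∀ p ∈ rest, p ∈ items := fun p hpm => hi7 p (List.mem_cons_of_mem _ hpm)
    -- A's membership tests against the day lists, read through the invariant
    have hA2 : (cs.filter fun c => d2.contains c).isEmpty = false ↔ (2 : Int) ∈ pending.getD cur PySem.Set.empty := by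
      rw [pvFilter_isEmpty_false, hp 2]
      constructor
      · rintro ⟨c, hc, hcc⟩; exact ⟨c, hc, (hi2 c).mp (List.contains_iff_mem.mp hcc)⟩
      · rintro ⟨c, hc, hcc⟩; exact ⟨c, hc, List.contains_iff_mem.mpr ((hi2 c).mpr hcc)⟩
    have hA1 : (cs.filter fun c => d1.contains c).isEmpty = false ↔ (1 : Int) ∈ pending.getD cur PySem.Set.empty := by
      rw [pvFilter_isEmpty_false, hp 1]
      constructor
      · rintro ⟨c, hc, hcc⟩; exact ⟨c, hc, (hi1 c).mp (List.contains_iff_mem.mp hcc)⟩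
      · rintro ⟨c, hc, hcc⟩; exact ⟨c, hc, List.contains_iff_mem.mpr ((hi1 c).mpr hcc)⟩
    simp only [pvLoopB, pvPassA, pvContains_false hd1cur, pvContains_false hd2cur,
      Bool.or_self, Bool.false_eq_true, if_false]
    by_cases h2 : (2 : Int) ∈ pending.getD cur PySem.Set.empty <;>
      by_cases h1 : (1 : Int) ∈ pending.getD cur PySem.Set.empty
    · -- both days pending: A returns False via both-nonempty, B via the contains test
      have hE2 := hA2.mpr h2
      have hE1 := hA1.mpr h1
      have hc1 : (pending.getD cur PySem.Set.empty).contains 1 = true :=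
        (PySem.Set.contains_iff _ _).mpr h1
      have hc2 : (pending.getD cur PySem.Set.empty).contains 2 = true :=
        (PySem.Set.contains_iff _ _).mpr h2
      rw [hE1, hE2, hc1, hc2]
      simp
    · -- only day 2 pending: both place cur on day 1
      have hE2 := hA2.mpr h2
      have hE1 : (cs.filter fun c => d1.contains c).isEmpty = true := by
        rw [← Bool.not_eq_false]; exact fun hf => h1 (hA1.mp hf)
      have hc1 : (pending.getD cur PySem.Set.empty).contains 1 = false := by
        rw [← Bool.not_eq_true, PySem.Set.contains_iff]; exact h1
      have hc2 : (pending.getD cur PySem.Set.empty).contains 2 = true :=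
        (PySem.Set.contains_iff _ _).mpr h2
      rw [hE1, hE2, hc1, hc2]
      simp only [Bool.not_false, Bool.not_true, Bool.and_false, Bool.and_true,
        Bool.true_or, Bool.false_eq_true, if_false, if_true]
      exact ih (d1 ++ [cur]) d2 (color.insert cur 1) _
        (pvInv_append hi1 hcurn)
        (pvInv_other hi2 (by decide) hd2cur)
        (fun x d hx => by
          rw [PySem.Dict.get?_insert] at hx
          split at hx
          · cases hx; exact Or.inl rfl
          · exact hi3 x d hx)
        (fun p hpm => by
          rw [PySem.Dict.contains_insert, hrest4 p hpm]
          have : p.1 ≠ cur := by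
            simp only [List.map_cons, List.nodup_cons] at hi6
            exact fun e => hi6.1 (e ▸ List.mem_map.mpr ⟨p, hpm, rfl⟩)
          simp [this])
        (pvInvStep items hnd cur cs rest color pending 1 hi4 hi5 hi6 hi7)
        hrest6 hrest7
    · -- only day 1 pending: both place cur on day 2
      have hE1 := hA1.mpr h1
      have hE2 : (cs.filter fun c => d2.contains c).isEmpty = true := by
        rw [← Bool.not_eq_false]; exact fun hf => h2 (hA2.mp hf)
      have hc2 : (pending.getD cur PySem.Set.empty).contains 2 = false := by
        rw [← Bool.not_eq_true, PySem.Set.contains_iff]; exact h2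
      have hc1 : (pending.getD cur PySem.Set.empty).contains 1 = true :=
        (PySem.Set.contains_iff _ _).mpr h1
      have hPne : (pending.getD cur PySem.Set.empty).isEmpty = false := by
        cases hP : pending.getD cur PySem.Set.empty with
        | nil => rw [hP] at h1; cases h1
        | cons a t => rfl
      rw [hE1, hE2, hc1, hc2, hPne]
      simp only [Bool.not_false, Bool.not_true, Bool.and_false, Bool.and_true,
        Bool.false_or, Bool.false_eq_true, if_false, if_true]
      exact ih d1 (d2 ++ [cur]) (color.insert cur 2) _
        (pvInv_other hi1 (by decide) hd1cur)
        (pvInv_append hi2 hcurn)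
        (fun x d hx => by
          rw [PySem.Dict.get?_insert] at hx
          split at hx
          · cases hx; exact Or.inr rfl
          · exact hi3 x d hx)
        (fun p hpm => by
          rw [PySem.Dict.contains_insert, hrest4 p hpm]
          have : p.1 ≠ cur := by
            simp only [List.map_cons, List.nodup_cons] at hi6
            exact fun e => hi6.1 (e ▸ List.mem_map.mpr ⟨p, hpm, rfl⟩)
          simp [this])
        (pvInvStep items hnd cur cs rest color pending 2 hi4 hi5 hi6 hi7)
        hrest6 hrest7
    · -- nothing pending: both place cur on day 1
      have hPnil : pending.getD cur PySem.Set.empty = PySem.Set.empty := by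
        have hno : ∀ d : Int, d ∉ pending.getD cur PySem.Set.empty := by
          intro d hd
          obtain ⟨c, hc, hcol⟩ := (hp d).mp hd
          rcases hi3 c d hcol with rfl | rfl
          · exact h1 hd
          · exact h2 hd
        exact List.eq_nil_iff_forall_not_mem.mpr hno
      have hE1 : (cs.filter fun c => d1.contains c).isEmpty = true := by
        rw [← Bool.not_eq_false]; exact fun hf => h1 (hA1.mp hf)
      have hE2 : (cs.filter fun c => d2.contains c).isEmpty = true := by
        rw [← Bool.not_eq_false]; exact fun hf => h2 (hA2.mp hf)
      rw [hE1, hE2, hPnil]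
      simp only [Bool.not_true, Bool.and_false, Bool.false_eq_true, if_false]
      exact ih (d1 ++ [cur]) d2 (color.insert cur 1) _
        (pvInv_append hi1 hcurn)
        (pvInv_other hi2 (by decide) hd2cur)
        (fun x d hx => by
          rw [PySem.Dict.get?_insert] at hx
          split at hx
          · cases hx; exact Or.inl rfl
          · exact hi3 x d hx)
        (fun p hpm => by
          rw [PySem.Dict.contains_insert, hrest4 p hpm]
          have : p.1 ≠ cur := by
            simp only [List.map_cons, List.nodup_cons] at hi6
            exact fun e => hi6.1 (e ▸ List.mem_map.mpr ⟨p, hpm, rfl⟩)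
          simp [this])
        (pvInvStep items hnd cur cs rest color pending 1 hi4 hi5 hi6 hi7)
        hrest6 hrest7

theorem pvTop (items : List (String × List String)) (hnd : (items.map Prod.fst).Nodup) :
    pvWhileA (items.length + 1) items [] [] =
      pvLoopB (pvTriggers items) items PySem.Dict.empty (pvPendingInit items) := by
  have hmain := pvMain items hnd items [] [] PySem.Dict.empty (pvPendingInit items)
    (fun x => by simp [PySem.Dict.get?_empty])
    (fun x => by simp [PySem.Dict.get?_empty])
    (fun x d h => by rw [PySem.Dict.get?_empty] at h; cases h)
    (fun p _ => by rw [PySem.Dict.contains_empty])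
    (fun p _ d => by rw [pvPendingInit_getD]; simp [PySem.Set.empty, PySem.Dict.get?_empty])
    hnd
    (fun p hp => hp)
  rw [hmain]
  cases items with
  | nil => simp [pvWhileA, pvPassA]
  | cons q rest =>
    cases hpass : pvPassA (q :: rest) [] [] with
    | none => simp [pvWhileA, hpass]
    | some pr =>
      obtain ⟨e1, e2⟩ := pr
      have hlen := pvPassA_len (q :: rest) [] [] hnd
        (fun p _ => ⟨List.not_mem_nil, List.not_mem_nil⟩) e1 e2 hpass
      simp only [List.length_nil, List.length_cons] at hlen
      show pvWhileA ((q :: rest).length + 1) (q :: rest) [] [] = _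
      rw [pvWhileA, if_pos (by simp), hpass]
      show pvWhileA (rest.length + 1) (q :: rest) e1 e2 = _
      rw [pvWhileA, if_neg (by simp only [List.length_cons]; omega)]
      simp

-- ===== VERDICT (by name: the statement is the Claim_ definition above) =====
theorem is_possible_spec : Claim_equal_is_possible := by
  intro db _
  unfold Spec_is_possible
  have hnd : ((pvItemsA db).map Prod.fst).Nodup := by
    have hsub0 : (pvItemsA db).Sublist ((PySem.Dict.ofList db).items) := by
      unfold pvItemsA; exact List.filter_sublist
    have hsub : ((pvItemsA db).map Prod.fst).Sublist ((PySem.Dict.ofList db).items.map Prod.fst) :=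
      hsub0.map Prod.fst
    have hkeys : ((PySem.Dict.ofList db).items.map Prod.fst).Nodup := by
      have := PySem.Dict.nodup_keys_ofList (ν := List String) db
      simpa [PySem.Dict.keys] using this
    exact hkeys.sublist hsub
  exact pvTop (pvItemsA db) hnd
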